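-- pv_equiv track=rewrite | github.com/yuygfgg/easy_musiclib | lyrics/netease.py | merge_lyrics
-- ===== SOURCE A (Python) =====
-- def merge_lyrics(lrc_dict, tlyric_dict, unformatted_lines):
--     merged_lyrics = unformatted_lines
--     all_time_stamps = sorted(set(lrc_dict.keys()).union(tlyric_dict.keys()))
--     for time_stamp in all_time_stamps:
--         original_line = lrc_dict.get(time_stamp, "")
--         translated_line = tlyric_dict.get(time_stamp, "")
--         merged_lyrics.append(f"{time_stamp}{original_line}")
--         if translated_line:
--             merged_lyrics.append(f"{time_stamp}{translated_line}")
--     return "\n".join(merged_lyrics)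
-- ===== SOURCE B (Python) =====
-- def merge_lyrics(lrc_dict, tlyric_dict, unformatted_lines):
--     keys = list(dict.fromkeys(list(lrc_dict) + list(tlyric_dict)))
--     originals = [(ts, f"{ts}{lrc_dict.get(ts, '')}") for ts in keys]
--     translateds = [(ts, f"{ts}{tlyric_dict.get(ts, '')}") for ts in keys
--                    if tlyric_dict.get(ts, "")]
--     rows = sorted(originals + translateds, key=lambda r: r[0])
--     unformatted_lines.extend(text for _ts, text in rows)
--     return "\n".join(unformatted_lines)
-- ===== Notes on version B (the rewrite author's own statement) =====
-- stated objective: alternative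
-- what changed: B materialises (timestamp, text) rows for originals and translateds separately and lets ONE stable sort by timestamp interleave them (originals stay ahead of translateds at equal timestamps), instead of A's loop over the sorted deduplicated key set doing two per-key dict lookups and conditional appends.
import Mathlib
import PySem

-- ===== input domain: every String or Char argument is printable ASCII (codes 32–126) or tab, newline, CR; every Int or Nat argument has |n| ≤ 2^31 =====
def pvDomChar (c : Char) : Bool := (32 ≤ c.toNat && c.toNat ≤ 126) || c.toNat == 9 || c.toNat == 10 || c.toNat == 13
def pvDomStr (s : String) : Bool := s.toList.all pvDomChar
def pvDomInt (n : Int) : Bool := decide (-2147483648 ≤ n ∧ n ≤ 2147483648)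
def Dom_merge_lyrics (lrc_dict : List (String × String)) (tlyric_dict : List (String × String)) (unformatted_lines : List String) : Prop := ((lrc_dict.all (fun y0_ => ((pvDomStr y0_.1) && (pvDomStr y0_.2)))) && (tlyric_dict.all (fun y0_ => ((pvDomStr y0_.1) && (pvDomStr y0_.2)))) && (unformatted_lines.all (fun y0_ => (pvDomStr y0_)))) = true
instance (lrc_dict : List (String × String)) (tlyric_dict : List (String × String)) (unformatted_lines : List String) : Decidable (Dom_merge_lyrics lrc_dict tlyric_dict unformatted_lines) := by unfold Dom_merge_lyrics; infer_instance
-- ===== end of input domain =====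

-- B replaces A's per-key loop over the sorted key set by one stable sort of materialised
-- (timestamp, text) rows; equivalence is about the RETURN value (both also mutate
-- unformatted_lines in the same way in Python: A appends row by row, B extends with the same rows).

-- ===== PORT A =====
def merge_lyrics (lrc_dict : List (String × String)) (tlyric_dict : List (String × String)) (unformatted_lines : List String) : String :=
  let lrcD := PySem.Dict.ofList lrc_dict
  let tlD := PySem.Dict.ofList tlyric_dict
  let all_time_stamps :=
    PySem.List.sorted (PySem.Set.union (PySem.Set.ofList lrcD.keys) tlD.keys) (fun x => x) false
  let merged_lyrics := all_time_stamps.foldl (fun acc time_stamp =>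
      let original_line := lrcD.getD time_stamp ""
      let translated_line := tlD.getD time_stamp ""
      let acc := acc ++ [time_stamp ++ original_line]
      if translated_line ≠ "" then acc ++ [time_stamp ++ translated_line] else acc)
    unformatted_lines
  PySem.Str.join "\n" merged_lyrics

-- ===== PORT B =====
def merge_lyrics_alt (lrc_dict : List (String × String)) (tlyric_dict : List (String × String)) (unformatted_lines : List String) : String :=
  let lrcD := PySem.Dict.ofList lrc_dict
  let tlD := PySem.Dict.ofList tlyric_dict
  let keys := PySem.List.dedup (lrcD.keys ++ tlD.keys)
  let originals := keys.map (fun ts => (ts, ts ++ lrcD.getD ts ""))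
  let translateds := (keys.filter (fun ts => !(tlD.getD ts "" == ""))).map
      (fun ts => (ts, ts ++ tlD.getD ts ""))
  let rows := PySem.List.sorted (originals ++ translateds) (fun r => r.1) false
  PySem.Str.join "\n" (unformatted_lines ++ rows.map (fun r => r.2))

-- ===== PRECONDITION & SPEC =====
def Spec_merge_lyrics (lrc_dict : List (String × String)) (tlyric_dict : List (String × String)) (unformatted_lines : List String) (out : String) : Prop := out = merge_lyrics_alt lrc_dict tlyric_dict unformatted_lines
instance (lrc_dict : List (String × String)) (tlyric_dict : List (String × String)) (unformatted_lines : List String) (out : String) : Decidable (Spec_merge_lyrics lrc_dict tlyric_dict unformatted_lines out) := by unfold Spec_merge_lyrics; infer_instance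

-- ===== CLAIM (what is proved, stated in full; the proofs are below) =====
def Claim_equal_merge_lyrics : Prop := ∀ (lrc_dict : List (String × String)) (tlyric_dict : List (String × String)) (unformatted_lines : List String), Dom_merge_lyrics lrc_dict tlyric_dict unformatted_lines → Spec_merge_lyrics lrc_dict tlyric_dict unformatted_lines (merge_lyrics lrc_dict tlyric_dict unformatted_lines)

-- ===== LEMMAS AND PROOFS =====

-- `pvBefore` is the comparison insertion sort uses when sorting rows by their timestamp (fst).
abbrev pvBefore : String × String → String × String → Bool := fun a b => decide (a.1 < b.1)

def pvBody (F G : String → String) (done K : List String) : List (String × String) :=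
  K.flatMap (fun k => (k, F k) :: if k ∈ done then [(k, G k)] else [])

theorem pvBody_nil (F G : String → String) (K : List String) :
    pvBody F G [] K = K.map (fun k => (k, F k)) := by
  unfold pvBody
  induction K with
  | nil => rfl
  | cons k K ih => simp_all

theorem pvBody_congr (F G : String → String) (d1 d2 K : List String)
    (h : ∀ k ∈ K, (k ∈ d1 ↔ k ∈ d2)) : pvBody F G d1 K = pvBody F G d2 K := by
  unfold pvBody
  refine List.flatMap_congr (fun k hk => ?_)
  have := h k hk
  by_cases h1 : k ∈ d1
  · simp [h1, this.mp h1]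
  · have h2 : k ∉ d2 := fun hh => h1 (this.mpr hh)
    simp [h1, h2]

theorem pvBody_fst_mem (F G : String → String) (d K : List String) (y : String × String)
    (hy : y ∈ pvBody F G d K) : y.1 ∈ K := by
  unfold pvBody at hy
  simp only [List.mem_flatMap] at hy
  obtain ⟨k, hk, hyk⟩ := hy
  have : y.1 = k := by
    rcases List.mem_cons.mp hyk with h | h
    · simp [h]
    · split at h <;> simp_all
  simpa [this] using hk

theorem pvInsertBy_all_lt (b : String × String → String × String → Bool) (x : String × String)
    (l : List (String × String)) (h : ∀ y ∈ l, b x y = true) :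
    PySem.List.insertBy b x l = x :: l := by
  cases l with
  | nil => rfl
  | cons y ys =>
    show (if b x y then x :: y :: ys else y :: PySem.List.insertBy b x ys) = _
    simp [h y (by simp)]

theorem pv_ins_one (F G : String → String) (K done : List String) (k : String)
    (hK : K.Pairwise (· < ·)) (hk : k ∈ K) (hnd : k ∉ done) :
    PySem.List.insertBy pvBefore (k, G k) (pvBody F G done K) = pvBody F G (done ++ [k]) K := by
  induction K with
  | nil => cases hk
  | cons k0 K' ih =>
    have hlt : ∀ x ∈ K', k0 < x := (List.pairwise_cons.mp hK).1
    have hK' : K'.Pairwise (· < ·) := (List.pairwise_cons.mp hK).2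
    by_cases hkk : k = k0
    · subst hkk
      have hgrp : pvBody F G done (k :: K') = (k, F k) :: pvBody F G done K' := by
        simp [pvBody, hnd]
      rw [hgrp]
      have h1 : pvBefore (k, G k) (k, F k) = false := by simp [pvBefore]
      have step : PySem.List.insertBy pvBefore (k, G k) ((k, F k) :: pvBody F G done K')
          = (k, F k) :: PySem.List.insertBy pvBefore (k, G k) (pvBody F G done K') := by
        show (if pvBefore (k, G k) (k, F k) then _ else _) = _
        simp [h1]
      rw [step, pvInsertBy_all_lt _ _ _ (fun y hy => by
        have := pvBody_fst_mem F G done K' y hy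
        simp [pvBefore, hlt _ this])]
      have hnotmem : k ∉ K' := fun h => lt_irrefl k (hlt k h)
      have : pvBody F G (done ++ [k]) (k :: K') =
          (k, F k) :: (k, G k) :: pvBody F G (done ++ [k]) K' := by
        simp [pvBody]
      rw [this, pvBody_congr F G (done ++ [k]) done K' (fun k' hk' => by
        have : k' ≠ k := fun h => hnotmem (h ▸ hk')
        simp [this])]
    · have hkK' : k ∈ K' := by
        rcases List.mem_cons.mp hk with h | h
        · exact absurd h hkk
        · exact h
      have hk0k : k0 < k := hlt k hkK'
      have hb : ∀ v : String, pvBefore (k, G k) (k0, v) = false := by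
        intro v
        show decide ((k : String) < k0) = false
        exact decide_eq_false (not_lt.mpr hk0k.le)
      have hk0 : k0 ∈ done ++ [k] ↔ k0 ∈ done := by
        simp [Ne.symm hkk]
      by_cases hd : k0 ∈ done
      · have hgrp : pvBody F G done (k0 :: K') =
            (k0, F k0) :: (k0, G k0) :: pvBody F G done K' := by simp [pvBody, hd]
        rw [hgrp]
        show (if pvBefore (k, G k) (k0, F k0) then _ else _) = _
        rw [if_neg (by simp [hb])]
        show (k0, F k0) :: (if pvBefore (k, G k) (k0, G k0) then _ else _) = _
        rw [if_neg (by simp [hb])]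
        rw [ih hK' hkK']
        simp [pvBody, hd]
      · have hgrp : pvBody F G done (k0 :: K') = (k0, F k0) :: pvBody F G done K' := by
          simp [pvBody, hd]
        rw [hgrp]
        show (if pvBefore (k, G k) (k0, F k0) then _ else _) = _
        rw [if_neg (by simp [hb])]
        rw [ih hK' hkK']
        simp [pvBody, hd]
        exact fun h => hkk h.symm


theorem pv_ins_fold (F G : String → String) (K : List String) (J : List String) (done : List String)
    (hK : K.Pairwise (· < ·)) (hJK : ∀ j ∈ J, j ∈ K) (hnd : (done ++ J).Nodup) :
    J.foldl (fun acc j => PySem.List.insertBy pvBefore (j, G j) acc) (pvBody F G done K)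
      = pvBody F G (done ++ J) K := by
  induction J generalizing done with
  | nil => simp
  | cons j J' ih =>
    have hnd' : ((done ++ [j]) ++ J').Nodup := by simpa using hnd
    have hj : j ∉ done := by
      rcases (List.nodup_append.mp hnd) with ⟨_, _, hdis⟩
      exact fun h => hdis j h j (by simp) rfl
    rw [List.foldl_cons, pv_ins_one F G K done j hK (hJK j (by simp)) hj,
        ih (done ++ [j]) (fun j' hj' => hJK j' (by simp [hj'])) hnd']
    simp

theorem A_eq (lrc_dict tlyric_dict : List (String × String)) (unformatted_lines : List String) :
    merge_lyrics lrc_dict tlyric_dict unformatted_lines =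
      PySem.Str.join "\n" (unformatted_lines ++
        (PySem.List.sorted (PySem.Set.ofList ((PySem.Dict.ofList lrc_dict).keys ++ (PySem.Dict.ofList tlyric_dict).keys)) (fun x => x) false).flatMap
          (fun ts => (ts ++ (PySem.Dict.ofList lrc_dict).getD ts "") ::
            if (PySem.Dict.ofList tlyric_dict).getD ts "" ≠ "" then [ts ++ (PySem.Dict.ofList tlyric_dict).getD ts ""] else [])) := by
  unfold merge_lyrics
  dsimp only
  rw [show PySem.Set.union (PySem.Set.ofList (PySem.Dict.ofList lrc_dict).keys) (PySem.Dict.ofList tlyric_dict).keys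
        = PySem.Set.ofList ((PySem.Dict.ofList lrc_dict).keys ++ (PySem.Dict.ofList tlyric_dict).keys) by
      rw [PySem.Set.ofList_eq_foldl, PySem.Set.ofList_eq_foldl, List.foldl_append]; rfl]
  refine congrArg _ ?_
  rw [← PySem.List.foldl_append_eq_flatMap]
  exact PySem.List.foldl_congr_mem _ _ _ _ (fun acc ts _ => by
    by_cases h : (PySem.Dict.ofList tlyric_dict).getD ts "" = "" <;> simp [h])

theorem B_eq (lrc_dict tlyric_dict : List (String × String)) (unformatted_lines : List String) :
    merge_lyrics_alt lrc_dict tlyric_dict unformatted_lines =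
      PySem.Str.join "\n" (unformatted_lines ++
        (pvBody (fun ts => ts ++ (PySem.Dict.ofList lrc_dict).getD ts "")
          (fun ts => ts ++ (PySem.Dict.ofList tlyric_dict).getD ts "")
          ((PySem.List.dedup ((PySem.Dict.ofList lrc_dict).keys ++ (PySem.Dict.ofList tlyric_dict).keys)).filter
            (fun ts => !((PySem.Dict.ofList tlyric_dict).getD ts "" == "")))
          (PySem.List.sorted (PySem.List.dedup ((PySem.Dict.ofList lrc_dict).keys ++ (PySem.Dict.ofList tlyric_dict).keys)) (fun x => x) false)).map
          (fun r => r.2)) := by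
  unfold merge_lyrics_alt
  dsimp only
  set lrcD := PySem.Dict.ofList lrc_dict with hlrcD
  set tlD := PySem.Dict.ofList tlyric_dict with htlD
  set keys := PySem.List.dedup (lrcD.keys ++ tlD.keys) with hkeysdef
  set K := PySem.List.sorted keys (fun x => x) false with hKdef
  set J := keys.filter (fun ts => !(tlD.getD ts "" == "")) with hJdef
  set F := fun ts => ts ++ lrcD.getD ts "" with hF
  set G := fun ts => ts ++ tlD.getD ts "" with hG
  have hkeys_nodup : keys.Nodup := by
    rw [hkeysdef, PySem.List.dedup_eq_ofList]; exact PySem.Set.nodup_ofList _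
  have hK : K.Pairwise (· < ·) := by
    rw [hKdef, hkeysdef, PySem.List.dedup_eq_ofList]
    exact PySem.List.sorted_ofList_pairwise_lt _
  have hKperm : K.Perm keys := PySem.List.sorted_perm _ _ _
  have hO : PySem.List.sorted (keys.map (fun ts => (ts, F ts))) (fun r => r.1) false
      = K.map (fun k => (k, F k)) :=
    PySem.List.sorted_eq_of_perm_of_pairwise_lt _ _ _ (hKperm.map _) (List.pairwise_map.mpr hK)
  have hJK : ∀ j ∈ J, j ∈ K := fun j hj =>
    (PySem.List.mem_sorted _ _ _ _).mpr (List.mem_of_mem_filter hj)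
  have hnd : (([] : List String) ++ J).Nodup := by simpa [hJdef] using hkeys_nodup.filter _
  suffices h : PySem.List.sorted
      (keys.map (fun ts => (ts, F ts)) ++ J.map (fun ts => (ts, G ts))) (fun r => r.1) false
      = pvBody F G J K by rw [h]
  rw [PySem.List.sorted_eq_foldl_insertBy, List.foldl_append, ← PySem.List.sorted_eq_foldl_insertBy,
      hO, List.foldl_map, ← pvBody_nil F G K]
  exact pv_ins_fold F G K J [] hK hJK hnd

-- ===== VERDICT (by name: the statement is the Claim_ definition above) =====
theorem merge_lyrics_spec : Claim_equal_merge_lyrics := by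
  unfold Claim_equal_merge_lyrics
  intro lrc_dict tlyric_dict unformatted_lines _
  show merge_lyrics lrc_dict tlyric_dict unformatted_lines
      = merge_lyrics_alt lrc_dict tlyric_dict unformatted_lines
  rw [A_eq, B_eq]
  simp only [PySem.List.dedup_eq_ofList]
  refine congrArg _ (congrArg _ ?_)
  unfold pvBody
  rw [List.map_flatMap]
  refine List.flatMap_congr (fun k hk => ?_)
  have hkkeys : k ∈ PySem.Set.ofList ((PySem.Dict.ofList lrc_dict).keys ++ (PySem.Dict.ofList tlyric_dict).keys) :=
    (PySem.List.mem_sorted _ _ _ _).mp hk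
  by_cases h : (PySem.Dict.ofList tlyric_dict).getD k "" = "" <;>
    simp [List.mem_filter, h, hkkeys]
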